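-- pv_equiv track=rewrite | github.com/RynShuster/WatchTower | scripts/export-machine-list.py | uniquify_asset_id
-- ===== SOURCE A (Python) =====
-- def uniquify_asset_id(row: dict[str, str], asset: str, seen: set[str]) -> str:
--     if asset not in seen:
--         seen.add(asset)
--         return asset
--
--     make = str(row.get("B", "")).strip().upper()
--     serial = str(row.get("G", "")).strip()
--     if make and serial:
--         fallback = f"{make}-{serial}"
--         if fallback not in seen:
--             seen.add(fallback)
--             return fallback
--
--     suffix = 2
--     candidate = f"{asset}-{suffix}"
--     while candidate in seen:
--         suffix += 1
--         candidate = f"{asset}-{suffix}"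
--     seen.add(candidate)
--     return candidate
-- ===== SOURCE B (Python) =====
-- def uniquify_asset_id(row: dict[str, str], asset: str, seen: set[str]) -> str:
--     if asset not in seen:
--         chosen = asset
--     else:
--         make = str(row.get("B", "")).strip().upper()
--         serial = str(row.get("G", "")).strip()
--         fallback = f"{make}-{serial}" if make and serial else None
--         if fallback is not None and fallback not in seen:
--             chosen = fallback
--         else:
--             # One pass over seen: collect the tails already used behind
--             # "asset-", then take the first free number >= 2 (a gap must
--             # occur within len(tails)+1 tries, so the range is finite).
--             prefix = asset + "-"
--             tails = {s[len(prefix):] for s in seen if s.startswith(prefix)}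
--             n = next(n for n in range(2, len(tails) + 3) if str(n) not in tails)
--             chosen = f"{asset}-{n}"
--     seen.add(chosen)
--     return chosen
-- ===== Notes on version B (the rewrite author's own statement) =====
-- stated objective: alternative
-- what changed: Replaces A's probe-one-candidate-at-a-time while-loop with a single pass that collects the suffix tails already present behind 'asset-' into a set and then picks the first free number >= 2 arithmetically (first gap over a finite range).
import Mathlib
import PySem

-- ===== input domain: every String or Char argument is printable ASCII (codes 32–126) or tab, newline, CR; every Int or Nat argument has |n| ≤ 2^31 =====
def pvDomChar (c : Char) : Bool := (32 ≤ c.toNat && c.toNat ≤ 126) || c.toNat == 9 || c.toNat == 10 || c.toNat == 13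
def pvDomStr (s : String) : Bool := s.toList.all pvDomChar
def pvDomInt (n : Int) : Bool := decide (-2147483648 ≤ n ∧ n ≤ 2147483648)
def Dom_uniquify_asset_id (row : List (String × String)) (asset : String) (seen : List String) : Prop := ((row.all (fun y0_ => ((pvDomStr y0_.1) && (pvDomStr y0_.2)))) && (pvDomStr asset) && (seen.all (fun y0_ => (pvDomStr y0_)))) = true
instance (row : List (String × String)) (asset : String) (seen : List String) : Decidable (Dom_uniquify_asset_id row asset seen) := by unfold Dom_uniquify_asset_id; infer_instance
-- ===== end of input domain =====

-- B replaces A's probe-one-candidate-at-a-time while-loop by one pass over seen that collects the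
-- suffix tails behind "asset-" and picks the first free number >= 2 arithmetically (alternative algorithm).
-- Both Pythons also add the returned id to `seen`; the equivalence proved here is about the RETURN value only.

-- ===== PORT A =====
-- the `suffix = 2; while candidate in seen: …` loop; fuel `seen.length + 1` always
-- suffices in Python (seen is a set, so its length+1 distinct candidates cannot all be members);
-- on fuel exhaustion the current candidate is returned (a totalization guard, not a branch of A)
def pvFindSuffix (asset : String) (seen : List String) : Nat → Int → String
  | 0, suffix => asset ++ "-" ++ PySem.Int.toStr suffix
  | fuel + 1, suffix =>
      let candidate := asset ++ "-" ++ PySem.Int.toStr suffix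
      if seen.contains candidate then pvFindSuffix asset seen fuel (suffix + 1)
      else candidate

def uniquify_asset_id (row : List (String × String)) (asset : String) (seen : List String) : String :=
  if !(seen.contains asset) then asset
  else
    let make := PySem.Str.upper (PySem.Str.strip ((PySem.Dict.ofList row).getD "B" ""))
    let serial := PySem.Str.strip ((PySem.Dict.ofList row).getD "G" "")
    if make ≠ "" ∧ serial ≠ "" then
      let fallback := make ++ "-" ++ serial
      if !(seen.contains fallback) then fallback
      else pvFindSuffix asset seen (seen.length + 1) 2
    else pvFindSuffix asset seen (seen.length + 1) 2

-- ===== PORT B =====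
-- `{s[len(prefix):] for s in seen if s.startswith(prefix)}` — the set of tails already used behind "asset-"
-- (a Python set: only its membership and cardinality are consumed, so iteration order cannot matter)
def pvTails (asset : String) (seen : List String) : List String :=
  PySem.Set.ofList
    ((seen.filter (fun s => PySem.Str.startswith s (asset ++ "-"))).map
      (fun s => PySem.Str.slice s (some ((PySem.Str.len (asset ++ "-") : Int))) none))

-- `next(n for n in range(2, len(tails) + 3) if str(n) not in tails)` then f"{asset}-{n}";
-- the generator never exhausts (len(tails)+1 distinct numbers cannot all have their tail used),
-- so the `.getD` default is a totalization guard only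
def pvFirstFree (asset : String) (seen : List String) : String :=
  let tails := pvTails asset seen
  let n : Int :=
    ((PySem.List.pyRange 2 ((tails.length : Int) + 3) 1).find?
        (fun m => !(PySem.Set.contains tails (PySem.Int.toStr m)))).getD ((tails.length : Int) + 3)
  asset ++ "-" ++ PySem.Int.toStr n

def uniquify_asset_id_alt (row : List (String × String)) (asset : String) (seen : List String) : String :=
  if !(seen.contains asset) then asset
  else
    let make := PySem.Str.upper (PySem.Str.strip ((PySem.Dict.ofList row).getD "B" ""))
    let serial := PySem.Str.strip ((PySem.Dict.ofList row).getD "G" "")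
    let fallback : Option String :=
      if make ≠ "" ∧ serial ≠ "" then some (make ++ "-" ++ serial) else none
    match fallback with
    | some f => if ¬ seen.contains f then f else pvFirstFree asset seen
    | none => pvFirstFree asset seen

-- ===== PRECONDITION & SPEC =====
def Spec_uniquify_asset_id (row : List (String × String)) (asset : String) (seen : List String) (out : String) : Prop := out = uniquify_asset_id_alt row asset seen
instance (row : List (String × String)) (asset : String) (seen : List String) (out : String) : Decidable (Spec_uniquify_asset_id row asset seen out) := by unfold Spec_uniquify_asset_id; infer_instance

-- ===== CLAIM (what is proved, stated in full; the proofs are below) =====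
def Claim_equal_uniquify_asset_id : Prop := ∀ (row : List (String × String)) (asset : String) (seen : List String), Dom_uniquify_asset_id row asset seen → Spec_uniquify_asset_id row asset seen (uniquify_asset_id row asset seen)

-- ===== LEMMAS AND PROOFS =====

-- strings are equal when their character lists are
theorem pv_str_ext (s t : String) (h : s.toList = t.toList) : s = t :=
  String.toList_inj.mp h

-- one unfolding step of core's digit printer
theorem pv_tdc_unfold (f n : Nat) (l : List Char) :
    Nat.toDigitsCore 10 (f+1) n l =
      if n / 10 = 0 then Nat.digitChar (n % 10) :: l
      else Nat.toDigitsCore 10 f (n / 10) (Nat.digitChar (n % 10) :: l) := rfl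

-- the closed form of the digit string, for single-digit n
theorem pv_g_small (n : Nat) (h : n < 10) :
    (if n = 0 then ['0'] else ((Nat.digits 10 n).map Nat.digitChar).reverse)
      = [Nat.digitChar (n % 10)] := by
  by_cases h0 : n = 0
  · subst h0; rfl
  · rw [if_neg h0, Nat.digits_def' (by norm_num) (Nat.pos_of_ne_zero h0),
      Nat.div_eq_of_lt h, Nat.digits_zero, Nat.mod_eq_of_lt h]
    simp

-- with enough fuel, toDigitsCore prints the reversed digit list
theorem pv_tdc_eq : ∀ (f n : Nat) (l : List Char), n < 10 ^ (f+1) →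
    Nat.toDigitsCore 10 (f+1) n l =
      (if n = 0 then ['0'] else ((Nat.digits 10 n).map Nat.digitChar).reverse) ++ l := by
  intro f
  induction f with
  | zero =>
      intro n l hn
      have h10 : n < 10 := by simpa using hn
      rw [pv_tdc_unfold, if_pos (by omega), pv_g_small n h10]
      simp
  | succ f ih =>
      intro n l hn
      rw [pv_tdc_unfold]
      by_cases hdiv : n / 10 = 0
      · have h10 : n < 10 := by omega
        rw [if_pos hdiv, pv_g_small n h10]
        simp
      · have hpos : 0 < n := by omega
        have hlt : n / 10 < 10 ^ (f+1) := by
          refine Nat.div_lt_of_lt_mul ?_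
          calc n < 10 ^ (f+1+1) := hn
          _ = 10 * 10 ^ (f+1) := by ring
        rw [if_neg hdiv, ih (n/10) (Nat.digitChar (n%10) :: l) hlt, if_neg hdiv,
          if_neg (by omega), Nat.digits_def' (by norm_num) hpos]
        simp

-- str(n) for a natural number, in closed form
theorem pv_toDigits_eq (n : Nat) :
    Nat.toDigits 10 n = (if n = 0 then ['0'] else ((Nat.digits 10 n).map Nat.digitChar).reverse) := by
  have h1 : Nat.toDigits 10 n = Nat.toDigitsCore 10 (n+1) n [] := rfl
  have h2 : n < 10 ^ (n+1) :=
    lt_of_lt_of_le (Nat.lt_pow_self (by norm_num) ..)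
      (Nat.pow_le_pow_right (by norm_num) (Nat.le_succ n))
  rw [h1, pv_tdc_eq n n [] h2, List.append_nil]

theorem pv_digitChar_inj : ∀ d e : Nat, d < 10 → e < 10 → Nat.digitChar d = Nat.digitChar e → d = e := by
  intro d e hd he
  interval_cases d <;> interval_cases e <;> decide

theorem pv_map_digitChar_inj : ∀ (l1 l2 : List Nat), (∀ x ∈ l1, x < 10) → (∀ x ∈ l2, x < 10) →
    l1.map Nat.digitChar = l2.map Nat.digitChar → l1 = l2 := by
  intro l1
  induction l1 with
  | nil => intro l2 _ _ h; cases l2 <;> simp_all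
  | cons a t ih =>
      intro l2 h1 h2 h
      cases l2 with
      | nil => simp at h
      | cons b u =>
          simp only [List.map_cons, List.cons.injEq] at h
          have hab : a = b :=
            pv_digitChar_inj a b (h1 a (by simp)) (h2 b (by simp)) h.1
          have htu : t = u := ih u (fun x hx => h1 x (by simp [hx])) (fun x hx => h2 x (by simp [hx])) h.2
          rw [hab, htu]

theorem pv_toDigits_inj (a b : Nat) (h : Nat.toDigits 10 a = Nat.toDigits 10 b) : a = b := by
  rw [pv_toDigits_eq, pv_toDigits_eq] at h
  by_cases ha : a = 0 <;> by_cases hb : b = 0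
  · rw [ha, hb]
  · exfalso
    rw [if_pos ha, if_neg hb] at h
    have hmap : (Nat.digits 10 b).map Nat.digitChar = ['0'] := by
      have := h.symm
      rwa [List.reverse_eq_iff] at this
    have hdig : Nat.digits 10 b = [0] := by
      refine pv_map_digitChar_inj (Nat.digits 10 b) [0]
        (fun x hx => Nat.digits_lt_base (by norm_num) hx) (by simp) ?_
      simpa using hmap
    have := Nat.ofDigits_digits 10 b
    rw [hdig] at this
    simp [Nat.ofDigits] at this
    exact hb this.symm
  · exfalso
    rw [if_neg ha, if_pos hb] at h
    have hmap : (Nat.digits 10 a).map Nat.digitChar = ['0'] := by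
      rwa [List.reverse_eq_iff] at h
    have hdig : Nat.digits 10 a = [0] := by
      refine pv_map_digitChar_inj (Nat.digits 10 a) [0]
        (fun x hx => Nat.digits_lt_base (by norm_num) hx) (by simp) ?_
      simpa using hmap
    have := Nat.ofDigits_digits 10 a
    rw [hdig] at this
    simp [Nat.ofDigits] at this
    exact ha this.symm
  · rw [if_neg ha, if_neg hb, List.reverse_inj] at h
    exact Nat.digits_inj_iff.mp
      (pv_map_digitChar_inj (Nat.digits 10 a) (Nat.digits 10 b)
        (fun x hx => Nat.digits_lt_base (by norm_num) hx)
        (fun x hx => Nat.digits_lt_base (by norm_num) hx) h)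

-- str is injective on the nonnegative integers
theorem pv_toStr_inj (a b : Int) (ha : 0 ≤ a) (hb : 0 ≤ b)
    (h : PySem.Int.toStr a = PySem.Int.toStr b) : a = b := by
  have h' : PySem.Int.toChars a = PySem.Int.toChars b := by
    rw [← PySem.Int.toList_toStr, ← PySem.Int.toList_toStr, h]
  unfold PySem.Int.toChars at h'
  rw [if_neg (not_lt.mpr ha), if_neg (not_lt.mpr hb)] at h'
  have := pv_toDigits_inj a.toNat b.toNat h'
  omega

-- s[len(p):] is dropping p's characters
theorem pv_slice_drop (s p : String) :
    (PySem.Str.slice s (some ((PySem.Str.len p : Int))) none).toList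
      = s.toList.drop p.toList.length := by
  have hlen : ((PySem.Str.len p : Int)) = ((p.toList.length : Nat) : Int) := by
    simp [pysem]
  simp only [PySem.Str.toList_slice, PySem.Chars.slice_eq_listSlice, hlen,
    PySem.List.slice_from_natCast]

-- str(n) is a used tail exactly when the candidate string itself is in seen
theorem pv_mem_tails_iff (asset : String) (seen : List String) (n : Int) :
    PySem.Int.toStr n ∈ pvTails asset seen ↔ (asset ++ "-" ++ PySem.Int.toStr n) ∈ seen := by
  unfold pvTails
  rw [PySem.Set.mem_ofList]
  constructor
  · intro h
    rcases List.mem_map.mp h with ⟨s, hs, hval⟩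
    rcases List.mem_filter.mp hs with ⟨hseen, hsw⟩
    have hpref : (asset ++ "-").toList <+: s.toList := by
      refine (PySem.Chars.startswith_iff s.toList (asset ++ "-").toList).mp ?_
      simpa using hsw
    obtain ⟨t, ht⟩ := hpref
    have hdrop : (PySem.Str.slice s (some ((PySem.Str.len (asset ++ "-") : Int))) none).toList
        = s.toList.drop (asset ++ "-").toList.length := pv_slice_drop s (asset ++ "-")
    have hteq : t = (PySem.Int.toStr n).toList := by
      have h1 := hdrop
      rw [hval] at h1
      rw [← ht, List.drop_left] at h1
      exact h1.symm
    have hse : s = asset ++ "-" ++ PySem.Int.toStr n := by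
      apply pv_str_ext
      rw [← ht, hteq]
      simp [String.toList_append]
    rwa [hse] at hseen
  · intro h
    refine List.mem_map.mpr ⟨asset ++ "-" ++ PySem.Int.toStr n, List.mem_filter.mpr ⟨h, ?_⟩, ?_⟩
    · have hp : (asset ++ "-").toList <+: (asset ++ "-" ++ PySem.Int.toStr n).toList := by
        refine ⟨(PySem.Int.toStr n).toList, ?_⟩
        simp [String.toList_append]
      have hsw : PySem.Chars.startswith (asset ++ "-" ++ PySem.Int.toStr n).toList
          (asset ++ "-").toList = true :=
        (PySem.Chars.startswith_iff _ _).mpr hp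
      simpa using hsw
    · apply pv_str_ext
      have hlist : (asset ++ "-" ++ PySem.Int.toStr n).toList
          = (asset ++ "-").toList ++ (PySem.Int.toStr n).toList := by
        simp [String.toList_append]
      rw [pv_slice_drop, hlist, List.drop_left]

-- the Bool form of the previous lemma
theorem pv_contains_bridge (asset : String) (seen : List String) (n : Int) :
    PySem.Set.contains (pvTails asset seen) (PySem.Int.toStr n)
      = seen.contains (asset ++ "-" ++ PySem.Int.toStr n) := by
  rw [PySem.Set.contains_eq_listContains]
  by_cases h : (asset ++ "-" ++ PySem.Int.toStr n) ∈ seen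
  · rw [List.contains_iff_mem.mpr ((pv_mem_tails_iff asset seen n).mpr h),
      List.contains_iff_mem.mpr h]
  · have h1 : List.contains (pvTails asset seen) (PySem.Int.toStr n) = false := by
      rw [Bool.eq_false_iff]
      intro hx
      exact h ((pv_mem_tails_iff asset seen n).mp (List.contains_iff_mem.mp hx))
    have h2 : seen.contains (asset ++ "-" ++ PySem.Int.toStr n) = false := by
      rw [Bool.eq_false_iff]
      intro hx
      exact h (List.contains_iff_mem.mp hx)
    rw [h1, h2]

-- the tail set cannot be larger than seen
theorem pv_tails_le (asset : String) (seen : List String) :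
    (pvTails asset seen).length ≤ seen.length := by
  unfold pvTails
  refine le_trans (PySem.Set.length_ofList_le _) ?_
  rw [List.length_map]
  exact List.length_filter_le _ _

-- pigeonhole: among len(tails)+1 candidate numbers, some tail is unused
theorem pv_exists_free (asset : String) (seen : List String) :
    ∃ i : Nat, i < (pvTails asset seen).length + 1 ∧
      (!(seen.contains (asset ++ "-" ++ PySem.Int.toStr (2 + (i : Int))))) = true := by
  by_contra hall
  push Not at hall
  have hmem : ∀ i : Nat, i < (pvTails asset seen).length + 1 →
      PySem.Int.toStr (2 + (i:Int)) ∈ pvTails asset seen := by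
    intro i hi
    have hx := hall i hi
    have hx' : seen.contains (asset ++ "-" ++ PySem.Int.toStr (2 + (i:Int))) = true := by
      revert hx
      cases seen.contains (asset ++ "-" ++ PySem.Int.toStr (2 + (i:Int))) <;> simp
    exact (pv_mem_tails_iff asset seen _).mpr (List.contains_iff_mem.mp hx')
  have hnodup : ((List.range ((pvTails asset seen).length + 1)).map
      (fun (i : Nat) => PySem.Int.toStr (2 + (i:Int)))).Nodup := by
    refine List.Nodup.map_on ?_ (by first | exact List.nodup_range _ | exact List.nodup_range)
    intro x _ y _ hxy
    have := pv_toStr_inj (2 + (x:Int)) (2 + (y:Int)) (by omega) (by omega) hxy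
    omega
  have hsub : ∀ z ∈ (List.range ((pvTails asset seen).length + 1)).map
      (fun (i : Nat) => PySem.Int.toStr (2 + (i:Int))), z ∈ pvTails asset seen := by
    intro z hz
    rcases List.mem_map.mp hz with ⟨i, hi, rfl⟩
    exact hmem i (List.mem_range.mp hi)
  have hlen : ((List.range ((pvTails asset seen).length + 1)).map
      (fun (i : Nat) => PySem.Int.toStr (2 + (i:Int)))).length ≤ (pvTails asset seen).length := by
    rw [← List.toFinset_card_of_nodup hnodup]
    refine le_trans (Finset.card_le_card ?_) (List.toFinset_card_le _)
    intro z hz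
    exact List.mem_toFinset.mpr (hsub z (List.mem_toFinset.mp hz))
  rw [List.length_map, List.length_range] at hlen
  omega

-- a successful find? over a shorter range is the find? over any longer one
theorem pv_find_range_mono (q : Nat → Bool) (k1 k2 : Nat) (hk : k1 ≤ k2)
    (h : ∃ i, i < k1 ∧ q i = true) : (List.range k2).find? q = (List.range k1).find? q := by
  obtain ⟨i, hi, hq⟩ := h
  have hs : ((List.range k1).find? q).isSome := by
    rw [List.find?_isSome]
    exact ⟨i, List.mem_range.mpr hi, hq⟩
  rw [show k2 = k1 + (k2 - k1) by omega, List.range_add, List.find?_append]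
  cases hfind : (List.range k1).find? q with
  | none => rw [hfind] at hs; simp at hs
  | some v => rfl

-- A's while-loop equals the first-free scan over the same k suffix candidates (with matching default)
theorem pvFindSuffix_eq_find (asset : String) (seen : List String) :
    ∀ (k : Nat) (s : Int),
      pvFindSuffix asset seen k s =
        (((List.range k).map (fun (i : Nat) => asset ++ "-" ++ PySem.Int.toStr (s + (i : Int)))).find?
            (fun c => !(seen.contains c))).getD
          (asset ++ "-" ++ PySem.Int.toStr (s + (k : Int))) := by
  intro k
  induction k with
  | zero => intro s; simp [pvFindSuffix]
  | succ n ih =>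
      intro s
      rw [List.range_succ_eq_map]
      simp only [List.map_cons, List.map_map, Nat.cast_zero, add_zero]
      by_cases h : (asset ++ "-" ++ PySem.Int.toStr s) ∈ seen
      · rw [List.find?_cons_of_neg (by simp [h]), show pvFindSuffix asset seen (n+1) s
            = pvFindSuffix asset seen n (s+1) by simp [pvFindSuffix, h], ih (s + 1)]
        have hmap : (List.range n).map ((fun (i : Nat) => asset ++ "-" ++ PySem.Int.toStr (s + (i : Int))) ∘ (fun i => i + 1))
            = (List.range n).map (fun (i : Nat) => asset ++ "-" ++ PySem.Int.toStr (s + 1 + (i : Int))) := by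
          apply List.map_congr_left
          intro i _
          simp only [Function.comp]
          congr 2
          push_cast
          ring_nf
        rw [hmap]
        congr 2
        push_cast
        ring_nf
      · rw [List.find?_cons_of_pos (by simp [h])]
        simp [pvFindSuffix, h]

-- the heart of the equivalence: the parse-and-first-gap computation equals A's probing loop
theorem pv_firstFree_eq (asset : String) (seen : List String) :
    pvFirstFree asset seen = pvFindSuffix asset seen (seen.length + 1) 2 := by
  rw [pvFindSuffix_eq_find asset seen (seen.length + 1) 2]
  simp only [pvFirstFree]
  rw [PySem.List.pyRange_one]
  have h32 : ((((pvTails asset seen).length : Int) + 3) - 2).toNat = (pvTails asset seen).length + 1 := by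
    omega
  rw [h32, List.find?_map, List.find?_map]
  have hq : ((fun m => !(PySem.Set.contains (pvTails asset seen) (PySem.Int.toStr m)))
        ∘ (fun k : Nat => (2:Int) + k))
      = ((fun c => !(seen.contains c))
        ∘ (fun i : Nat => asset ++ "-" ++ PySem.Int.toStr (2 + (i : Int)))) := by
    funext i
    simp only [Function.comp]
    rw [pv_contains_bridge]
  rw [hq]
  obtain ⟨i, hi, hqi⟩ := pv_exists_free asset seen
  have hle : (pvTails asset seen).length + 1 ≤ seen.length + 1 := by
    have := pv_tails_le asset seen; omega
  have hmono := pv_find_range_mono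
    ((fun c => !(seen.contains c)) ∘ (fun i : Nat => asset ++ "-" ++ PySem.Int.toStr (2 + (i : Int))))
    ((pvTails asset seen).length + 1) (seen.length + 1) hle ⟨i, hi, hqi⟩
  rw [hmono]
  have hs : (((List.range ((pvTails asset seen).length + 1)).find?
      ((fun c => !(seen.contains c)) ∘ (fun i : Nat => asset ++ "-" ++ PySem.Int.toStr (2 + (i : Int)))))).isSome := by
    rw [List.find?_isSome]
    exact ⟨i, List.mem_range.mpr hi, hqi⟩
  obtain ⟨j, hj⟩ := Option.isSome_iff_exists.mp hs
  rw [hj]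
  simp

-- ===== VERDICT (by name: the statement is the Claim_ definition above) =====
set_option maxHeartbeats 800000 in
theorem uniquify_asset_id_spec : Claim_equal_uniquify_asset_id := by
  intro row asset seen _
  show uniquify_asset_id row asset seen = uniquify_asset_id_alt row asset seen
  unfold uniquify_asset_id uniquify_asset_id_alt
  by_cases hA : seen.contains asset <;>
    by_cases hm : PySem.Str.upper (PySem.Str.strip ((PySem.Dict.ofList row).getD "B" "")) = "" <;>
    by_cases hs : PySem.Str.strip ((PySem.Dict.ofList row).getD "G" "") = "" <;>
    by_cases hf : seen.contains (PySem.Str.upper (PySem.Str.strip ((PySem.Dict.ofList row).getD "B" ""))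
      ++ "-" ++ PySem.Str.strip ((PySem.Dict.ofList row).getD "G" "")) <;>
    simp [hA, hm, hs, hf, pv_firstFree_eq]
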